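-- pv_equiv track=rewrite | github.com/kangminchan99/coding_test_python | 프로그래머스/코딩 기초 트레이닝/Lv0 - 조건에 맞게 수열 변환하기 2.py | solution
-- ===== SOURCE A (Python) =====
-- def solution(arr):
--     count = -1
--
--     while True:
--         # 안에서 answer선언해주고
--         answer = []
--         for i in arr:
--             if i >= 50 and i % 2 == 0:
--                 answer.append(i // 2)
--             elif i < 50 and i % 2 != 0:
--                 answer.append(i * 2 + 1)
--             else:
--                 answer.append(i)
--
--         count += 1
--         if arr == answer:
--             return count
--
--         # arr을 answer로 바꿔준다
--         arr = answer
-- ===== SOURCE B (Python) =====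
-- def solution(arr):
--     best = 0
--     for i in arr:
--         c = 0
--         while True:
--             if i >= 50 and i % 2 == 0:
--                 j = i // 2
--             elif i < 50 and i % 2 != 0:
--                 j = i * 2 + 1
--             else:
--                 j = i
--             if j == i:
--                 break
--             i = j
--             c += 1
--         best = max(best, c)
--     return best
-- ===== Notes on version B (the rewrite author's own statement) =====
-- stated objective: alternative
-- what changed: Replaces the whole-array fixed-point simulation (rebuilding the entire list each round until it stops changing) with independent per-element trajectory lengths: each element is iterated to its own fixed point and the answer is the maximum step count over elements (0 for an empty list).
import Mathlib
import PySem

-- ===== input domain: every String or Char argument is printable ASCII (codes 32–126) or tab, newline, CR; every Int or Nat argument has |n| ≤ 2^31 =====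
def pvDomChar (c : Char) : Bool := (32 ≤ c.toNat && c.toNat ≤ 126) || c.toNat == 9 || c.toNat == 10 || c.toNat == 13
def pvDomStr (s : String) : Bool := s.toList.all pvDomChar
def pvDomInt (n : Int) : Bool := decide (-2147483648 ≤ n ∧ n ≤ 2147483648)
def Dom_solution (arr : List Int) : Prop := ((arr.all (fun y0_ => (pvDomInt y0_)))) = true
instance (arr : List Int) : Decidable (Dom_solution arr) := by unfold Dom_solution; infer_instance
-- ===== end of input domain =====

-- B replaces A's whole-array fixed-point simulation by independent per-element
-- trajectory lengths and a running maximum (alternative decomposition, same cost).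

-- ===== PORT A =====
-- the transform applied to each element (the loop body of A's inner for-loop)
def pvF (i : Int) : Int :=
  if 50 ≤ i ∧ PySem.Int.mod i 2 = 0 then PySem.Int.floordiv i 2
  else if i < 50 ∧ ¬ PySem.Int.mod i 2 = 0 then i * 2 + 1
  else i

-- termination measure for the (partial) Python loops; the dite guards below only
-- make the recursions total: inside Pre_solution they never cut the loop short
def pvMu (i : Int) : Nat :=
  if pvF i = i then 0 else if 50 ≤ i then i.toNat + 100 else (50 - i).toNat + 1

def pvMuS (l : List Int) : Nat := (l.map pvMu).sum

-- A's 'while True' loop: build answer, count += 1, return count if arr == answer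
def solutionGo (arr : List Int) (count : Int) : Int :=
  let answer := arr.foldl (fun ans i => ans ++ [pvF i]) []
  if h : arr ≠ answer ∧ pvMuS answer < pvMuS arr then
    solutionGo answer (count + 1)
  else
    count + 1
termination_by pvMuS arr
decreasing_by exact h.2

def solution (arr : List Int) : Int := solutionGo arr (-1)

-- ===== PORT B =====
-- Source B's inner 'while True' loop: iterate one element to its fixed point, counting
def pvStepsGo (i : Int) (c : Int) : Int :=
  let j := pvF i
  if h : j ≠ i ∧ pvMu j < pvMu i then pvStepsGo j (c + 1) else c
termination_by pvMu i
decreasing_by exact h.2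

def solution_alt (arr : List Int) : Int :=
  arr.foldl (fun best i => max best (pvStepsGo i 0)) 0

-- ===== PRECONDITION & SPEC =====
-- Pre_ excludes arrays containing an odd element ≤ -3: on those A's while-loop
-- never terminates (i*2+1 keeps decreasing), so A returns on exactly Pre_.
def Pre_solution (arr : List Int) : Prop := ∀ i ∈ arr, i % 2 = 0 ∨ -1 ≤ i
instance (arr : List Int) : Decidable (Pre_solution arr) := by unfold Pre_solution; infer_instance

def pvWitness_solution : List Int := [54, 3, 7, -1, 0]

def Spec_solution (arr : List Int) (out : Int) : Prop := out = solution_alt arr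
instance (arr : List Int) (out : Int) : Decidable (Spec_solution arr out) := by unfold Spec_solution; infer_instance

-- ===== CLAIM (what is proved, stated in full; the proofs are below) =====
def Claim_equal_solution : Prop := ∀ (arr : List Int), Dom_solution arr → Pre_solution arr → Spec_solution arr (solution arr)

-- ===== LEMMAS AND PROOFS =====

theorem pvF_eq (i : Int) :
    pvF i = if 50 ≤ i ∧ i % 2 = 0 then i / 2
            else if i < 50 ∧ ¬ i % 2 = 0 then i * 2 + 1 else i := by
  have h1 : PySem.Int.mod i 2 = i % 2 := PySem.Int.mod_eq_emod_of_pos (by norm_num)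
  have h2 : PySem.Int.floordiv i 2 = i / 2 := PySem.Int.floordiv_eq_ediv_of_pos (by norm_num)
  rw [pvF] ; rw [h1, h2]

-- goodness of a single element (the element-wise reading of Pre_solution)
theorem pv_good_pres (i : Int) (hg : i % 2 = 0 ∨ -1 ≤ i) :
    pvF i % 2 = 0 ∨ -1 ≤ pvF i := by
  rw [pvF_eq]; split_ifs <;> omega

theorem pv_mu_lt (i : Int) (hg : i % 2 = 0 ∨ -1 ≤ i) (hne : pvF i ≠ i) :
    pvMu (pvF i) < pvMu i := by
  by_cases hA : 50 ≤ i ∧ i % 2 = 0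
  · have hFi : pvF i = i / 2 := by rw [pvF_eq, if_pos hA]
    have h2 := pvF_eq (i / 2)
    rw [hFi] at hne ⊢
    simp only [pvMu, hFi, h2]
    split_ifs <;> omega
  · by_cases hB : i < 50 ∧ ¬ i % 2 = 0
    · have hFi : pvF i = i * 2 + 1 := by rw [pvF_eq, if_neg hA, if_pos hB]
      have h2 := pvF_eq (i * 2 + 1)
      rw [hFi] at hne ⊢
      rcases hg with hg | hg
      · omega
      · simp only [pvMu, hFi, h2]
        split_ifs <;> omega
    · have hFi : pvF i = i := by rw [pvF_eq, if_neg hA, if_neg hB]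
      exact absurd hFi hne

theorem pv_mu_le (i : Int) (hg : i % 2 = 0 ∨ -1 ≤ i) : pvMu (pvF i) ≤ pvMu i := by
  by_cases h : pvF i = i
  · rw [h]
  · exact Nat.le_of_lt (pv_mu_lt i hg h)

-- pvStepsGo unfolds like the Python loop on good elements
theorem pvStepsGo_eq (i c : Int) (hg : i % 2 = 0 ∨ -1 ≤ i) :
    pvStepsGo i c = if pvF i = i then c else pvStepsGo (pvF i) (c + 1) := by
  rw [pvStepsGo]
  by_cases h : pvF i = i
  · rw [dif_neg (by simp [h]), if_pos h]
  · rw [dif_pos ⟨h, pv_mu_lt i hg h⟩, if_neg h]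

theorem pvStepsGo_nonneg_fuel (n : Nat) : ∀ (i c : Int), pvMu i ≤ n → 0 ≤ c → 0 ≤ pvStepsGo i c := by
  induction n with
  | zero =>
      intro i c hn hc
      rw [pvStepsGo]
      split_ifs with h
      · exact absurd h.2 (by omega)
      · exact hc
  | succ n ih =>
      intro i c hn hc
      rw [pvStepsGo]
      split_ifs with h
      · exact ih (pvF i) (c + 1) (by omega) (by omega)
      · exact hc

theorem pvStepsGo_nonneg (i : Int) (c : Int) (hc : 0 ≤ c) : 0 ≤ pvStepsGo i c :=
  pvStepsGo_nonneg_fuel (pvMu i) i c le_rfl hc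

theorem pvStepsGo_acc_fuel (n : Nat) : ∀ (i c : Int), pvMu i ≤ n →
    pvStepsGo i c = c + pvStepsGo i 0 := by
  induction n with
  | zero =>
      intro i c hn
      rw [pvStepsGo]
      conv_rhs => rw [pvStepsGo]
      split_ifs with h
      · exact absurd h.2 (by omega)
      · ring
  | succ n ih =>
      intro i c hn
      rw [pvStepsGo]
      conv_rhs => rw [pvStepsGo]
      split_ifs with h
      · rw [ih (pvF i) (c + 1) (by omega), ih (pvF i) (0 + 1) (by omega)]
        ring
      · ring

theorem pvStepsGo_acc (i : Int) (c : Int) : pvStepsGo i c = c + pvStepsGo i 0 :=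
  pvStepsGo_acc_fuel (pvMu i) i c le_rfl

-- per-element step count
theorem pvSteps_rec (i : Int) (hg : i % 2 = 0 ∨ -1 ≤ i) :
    pvStepsGo i 0 = if pvF i = i then 0 else 1 + pvStepsGo (pvF i) 0 := by
  rw [pvStepsGo_eq i 0 hg]
  by_cases h : pvF i = i
  · rw [if_pos h, if_pos h]
  · rw [if_neg h, if_neg h]
    rw [show (0 : Int) + 1 = 1 from rfl, pvStepsGo_acc (pvF i) 1]

theorem pvSteps_map (i : Int) (hg : i % 2 = 0 ∨ -1 ≤ i) :
    pvStepsGo (pvF i) 0 = max (pvStepsGo i 0 - 1) 0 := by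
  by_cases h : pvF i = i
  · have h0 : pvStepsGo i 0 = 0 := by rw [pvSteps_rec i hg, if_pos h]
    rw [h, h0]
    norm_num
  · have h1 : pvStepsGo i 0 = 1 + pvStepsGo (pvF i) 0 := by rw [pvSteps_rec i hg, if_neg h]
    have hn : 0 ≤ pvStepsGo (pvF i) 0 := pvStepsGo_nonneg _ 0 le_rfl
    omega

-- the max-fold and its accumulator law
theorem pv_fold_acc (l : List Int) : ∀ a : Int, 0 ≤ a →
    l.foldl (fun best i => max best (pvStepsGo i 0)) a
      = max a (l.foldl (fun best i => max best (pvStepsGo i 0)) 0) := by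
  induction l with
  | nil => intro a ha; simp; omega
  | cons x l ih =>
      intro a ha
      have hx : 0 ≤ pvStepsGo x 0 := pvStepsGo_nonneg _ 0 le_rfl
      simp only [List.foldl_cons]
      rw [ih (max a (pvStepsGo x 0)) (by omega), ih (max 0 (pvStepsGo x 0)) (by omega)]
      omega

theorem pv_alt_cons (x : Int) (l : List Int) :
    solution_alt (x :: l) = max (pvStepsGo x 0) (solution_alt l) := by
  have hx : 0 ≤ pvStepsGo x 0 := pvStepsGo_nonneg _ 0 le_rfl
  simp only [solution_alt, List.foldl_cons]
  rw [pv_fold_acc l (max 0 (pvStepsGo x 0)) (by omega)]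
  omega

theorem pv_alt_nonneg (l : List Int) : 0 ≤ solution_alt l := by
  induction l with
  | nil => simp [solution_alt]
  | cons x l ih => rw [pv_alt_cons]; omega

theorem pv_alt_fixed (l : List Int) (h : ∀ i ∈ l, pvF i = i) : solution_alt l = 0 := by
  induction l with
  | nil => simp [solution_alt]
  | cons x l ih =>
      rw [pv_alt_cons]
      have hx : pvStepsGo x 0 = 0 := by
        rw [pvStepsGo]
        rw [dif_neg (by simp [h x (by simp)])]
      rw [hx, ih (fun i hi => h i (List.mem_cons_of_mem _ hi))]
      simp

theorem pv_alt_map (l : List Int) (hg : ∀ i ∈ l, i % 2 = 0 ∨ -1 ≤ i) :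
    solution_alt (l.map pvF) = max (solution_alt l - 1) 0 := by
  induction l with
  | nil => simp [solution_alt]
  | cons x l ih =>
      have hx := pvSteps_map x (hg x (by simp))
      have h0 : 0 ≤ pvStepsGo x 0 := pvStepsGo_nonneg _ 0 le_rfl
      have h1 : 0 ≤ solution_alt l := pv_alt_nonneg l
      simp only [List.map_cons]
      rw [pv_alt_cons, pv_alt_cons, hx, ih (fun i hi => hg i (List.mem_cons_of_mem _ hi))]
      omega

theorem pv_alt_ge (l : List Int) (i : Int) (hi : i ∈ l) : pvStepsGo i 0 ≤ solution_alt l := by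
  induction l with
  | nil => cases hi
  | cons x l ih =>
      rw [pv_alt_cons]
      rcases List.mem_cons.mp hi with h | h
      · subst h; omega
      · have := ih h; omega

theorem pv_alt_pos (l : List Int) (hg : ∀ i ∈ l, i % 2 = 0 ∨ -1 ≤ i)
    (h : ∃ i ∈ l, pvF i ≠ i) : 1 ≤ solution_alt l := by
  obtain ⟨i, hi, hne⟩ := h
  have h1 := pv_alt_ge l i hi
  have h2 : 0 ≤ pvStepsGo (pvF i) 0 := pvStepsGo_nonneg _ 0 le_rfl
  rw [pvSteps_rec i (hg i hi)] at h1
  simp [hne] at h1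
  omega

-- A's inner for-loop builds exactly List.map pvF
theorem pv_build_eq_map (l : List Int) : ∀ a : List Int,
    l.foldl (fun ans i => ans ++ [pvF i]) a = a ++ l.map pvF := by
  induction l with
  | nil => simp
  | cons x l ih => intro a; simp [List.foldl_cons, ih (a ++ [pvF x])]

-- the list measure strictly decreases on good, non-fixed arrays
theorem pv_muS_le (l : List Int) (hg : ∀ i ∈ l, i % 2 = 0 ∨ -1 ≤ i) :
    pvMuS (l.map pvF) ≤ pvMuS l := by
  induction l with
  | nil => simp [pvMuS]
  | cons x l ih =>
      have h1 := pv_mu_le x (hg x (by simp))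
      have h2 := ih (fun i hi => hg i (List.mem_cons_of_mem _ hi))
      simp only [pvMuS, List.map_cons, List.sum_cons] at *
      omega

theorem pv_muS_lt (l : List Int) (hg : ∀ i ∈ l, i % 2 = 0 ∨ -1 ≤ i)
    (h : l.map pvF ≠ l) : pvMuS (l.map pvF) < pvMuS l := by
  induction l with
  | nil => simp at h
  | cons x l ih =>
      have hgl : ∀ i ∈ l, i % 2 = 0 ∨ -1 ≤ i := fun i hi => hg i (List.mem_cons_of_mem _ hi)
      simp only [List.map_cons, List.cons.injEq, ne_eq] at h
      by_cases hx : pvF x = x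
      · have hl : l.map pvF ≠ l := by
          intro he; exact h ⟨hx, he⟩
        have h1 := pv_mu_le x (hg x (by simp))
        have h2 := ih hgl hl
        simp only [pvMuS, List.map_cons, List.sum_cons] at *
        omega
      · have h1 := pv_mu_lt x (hg x (by simp)) hx
        have h2 := pv_muS_le l hgl
        simp only [pvMuS, List.map_cons, List.sum_cons] at *
        omega

theorem pv_self_map (l : List Int) (h : ∀ i ∈ l, pvF i = i) : l.map pvF = l := by
  induction l with
  | nil => simp
  | cons x l ih =>
      simp only [List.map_cons, h x (by simp)]
      rw [ih (fun i hi => h i (List.mem_cons_of_mem _ hi))]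

theorem pv_map_eq_self (l : List Int) (h : l.map pvF = l) : ∀ i ∈ l, pvF i = i := by
  induction l with
  | nil => simp
  | cons x l ih =>
      simp only [List.map_cons, List.cons.injEq] at h
      intro i hi
      rcases List.mem_cons.mp hi with h' | h'
      · subst h'; exact h.1
      · exact ih h.2 i h'

-- the main loop computes the max of the per-element step counts
theorem pv_go_eq (n : Nat) : ∀ (arr : List Int) (c : Int), pvMuS arr ≤ n →
    (∀ i ∈ arr, i % 2 = 0 ∨ -1 ≤ i) →
    solutionGo arr c = c + 1 + solution_alt arr := by
  induction n with
  | zero =>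
      intro arr c hle hg
      rw [solutionGo]
      have hfix : arr.map pvF = arr := by
        by_contra hne
        have := pv_muS_lt arr hg hne
        omega
      rw [pv_build_eq_map arr []]
      simp only [List.nil_append, hfix]
      have h0 : solution_alt arr = 0 := pv_alt_fixed arr (pv_map_eq_self arr hfix)
      simp [h0]
  | succ n ih =>
      intro arr c hle hg
      rw [solutionGo]
      rw [pv_build_eq_map arr []]
      simp only [List.nil_append]
      by_cases hfix : arr.map pvF = arr
      · have h0 : solution_alt arr = 0 := pv_alt_fixed arr (pv_map_eq_self arr hfix)
        simp [hfix, h0]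
      · have hlt := pv_muS_lt arr hg hfix
        have hgm : ∀ i ∈ arr.map pvF, i % 2 = 0 ∨ -1 ≤ i := by
          intro i hi
          obtain ⟨j, hj, rfl⟩ := List.mem_map.mp hi
          exact pv_good_pres j (hg j hj)
        have hne : arr ≠ arr.map pvF := fun he => hfix he.symm
        rw [dif_pos ⟨hne, hlt⟩]
        rw [ih (arr.map pvF) (c + 1) (by omega) hgm]
        have hmap := pv_alt_map arr hg
        have hpos := pv_alt_pos arr hg (by
          by_contra hcon
          push Not at hcon
          exact hfix (pv_self_map arr hcon))
        omega

-- ===== VERDICT (by name: the statement is the Claim_ definition above) =====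
theorem solution_spec : Claim_equal_solution := by
  intro arr _ hpre
  unfold Spec_solution solution
  rw [pv_go_eq (pvMuS arr) arr (-1) le_rfl hpre]
  ring
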